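-- pv_equiv track=rewrite | github.com/icarus-sparry/diva | cmd/find2.py | resolve_orphan_dependencies
-- ===== SOURCE A (Python) =====
-- def resolve_orphan_dependencies(bundled, orphans, package_files, provides,
--                                 required, to_check):
--     new_check = {}
--     new_required = False
--
--     for srcrpm, package in to_check.items():
--         used = False
--         for dep in provides.get(srcrpm, ()):
--             if used:
--                 break
--             for req in required.get(dep, ()):
--                 if req in bundled:
--                     used = True
--                     break
--         for file in package_files.get(srcrpm, ()):
--             if used:
--                 break
--             for req in required.get(file, ()):
--                 if req in bundled:
--                     used = True
--                     break
--         if used: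
--             bundled.add(srcrpm)
--             new_required = True
--         else:
--             new_check[srcrpm] = package
--
--     if new_required:
--         return resolve_orphan_dependencies(bundled, orphans, package_files,
--                                            provides, required, new_check)
--     else:
--         return new_check
-- ===== SOURCE B (Python) =====
-- def resolve_orphan_dependencies(bundled, orphans, package_files, provides,
--                                 required, to_check):
--     # Worklist propagation: build a reverse index (requirement -> srcrpms that
--     # would become bundled), then BFS/DFS from the initially bundled names,
--     # touching each dependency edge once instead of re-scanning every round.
--     rev = {}
--     for srcrpm in to_check:
--         for key in list(provides.get(srcrpm, ())) + list(package_files.get(srcrpm, ())):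
--             for req in required.get(key, ()):
--                 rev.setdefault(req, []).append(srcrpm)
--     marked = set()
--     stack = list(bundled)
--     while stack:
--         r = stack.pop()
--         for s in rev.get(r, ()):
--             if s not in marked:
--                 marked.add(s)
--                 stack.append(s)
--     bundled |= marked  # same in-place growth of `bundled` as the original
--     return {s: p for s, p in to_check.items() if s not in marked}
-- ===== Notes on version B (the rewrite author's own statement) =====
-- stated objective: alternative
-- what changed: Replaces the repeated full-round recursion (rescan every remaining package against the grown bundled set until a fixpoint) by a one-shot reverse-dependency index plus a worklist propagation that processes each newly bundled name once, then a single filter of to_check.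
import Mathlib
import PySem

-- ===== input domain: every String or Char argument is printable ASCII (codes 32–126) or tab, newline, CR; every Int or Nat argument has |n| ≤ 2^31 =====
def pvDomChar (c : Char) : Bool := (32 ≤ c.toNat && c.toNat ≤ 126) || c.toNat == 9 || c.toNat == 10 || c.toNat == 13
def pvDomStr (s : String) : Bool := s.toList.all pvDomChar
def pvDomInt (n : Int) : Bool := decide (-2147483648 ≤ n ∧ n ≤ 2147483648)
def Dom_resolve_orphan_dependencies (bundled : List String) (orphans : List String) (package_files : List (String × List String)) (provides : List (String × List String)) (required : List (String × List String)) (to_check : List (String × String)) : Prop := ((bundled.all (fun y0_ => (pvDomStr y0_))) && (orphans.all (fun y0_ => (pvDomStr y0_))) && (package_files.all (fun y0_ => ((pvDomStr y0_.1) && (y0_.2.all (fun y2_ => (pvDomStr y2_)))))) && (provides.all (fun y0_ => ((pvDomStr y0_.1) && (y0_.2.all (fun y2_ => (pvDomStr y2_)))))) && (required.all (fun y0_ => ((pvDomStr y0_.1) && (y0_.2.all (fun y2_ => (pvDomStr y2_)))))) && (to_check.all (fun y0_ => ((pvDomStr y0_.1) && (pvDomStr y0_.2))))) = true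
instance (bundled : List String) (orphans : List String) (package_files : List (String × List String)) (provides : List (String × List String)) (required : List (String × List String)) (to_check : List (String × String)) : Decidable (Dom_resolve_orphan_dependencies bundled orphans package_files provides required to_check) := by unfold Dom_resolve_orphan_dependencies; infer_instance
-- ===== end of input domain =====

-- B replaces A's recursive re-scanning rounds by a reverse-dependency index plus a
-- worklist propagation processing each newly bundled name once (objective: alternative
-- algorithm, same measured cost on the generated inputs). Equivalence is about the
-- RETURN value only: Python A mutates the `bundled` set in place, and Python B
-- performs the same in-place growth of `bundled`.

-- ===== PORT A =====
-- shared primitive: Python dict.get(k, ()) on the association-list representation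
def pvGet (d : List (String × List String)) (k : String) : List String :=
  match d.find? (fun p => p.1 == k) with
  | some p => p.2
  | none => []

-- A's 'for key in keys: if used: break; for req in required.get(key, ()): if req in bundled: used = True; break'
def pvUsedLoop (required : List (String × List String)) (b : List String) (keys : List String) (used : Bool) : Bool :=
  keys.foldl (fun u key =>
    if u then u
    else (pvGet required key).foldl (fun u2 req => if u2 then u2 else b.contains req) false) used

-- the value of A's 'used' flag for one srcrpm (provides-loop then package_files-loop)
def pvUsedA (package_files provides required : List (String × List String)) (b : List String) (srcrpm : String) : Bool :=
  pvUsedLoop required b (pvGet package_files srcrpm)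
    (pvUsedLoop required b (pvGet provides srcrpm) false)

-- one pass of A's 'for srcrpm, package in to_check.items()': returns (bundled', new_check, new_required)
def pvRoundA (package_files provides required : List (String × List String)) (b : List String) :
    List (String × String) → List String × List (String × String) × Bool
  | [] => (b, [], false)
  | it :: rest =>
    if pvUsedA package_files provides required b it.1 then
      let r := pvRoundA package_files provides required (PySem.Set.add b it.1) rest
      (r.1, r.2.1, true)
    else
      let r := pvRoundA package_files provides required b rest
      (r.1, it :: r.2.1, r.2.2)

-- termination facts for the round recursion (cited by pvResolveA's decreasing_by)
theorem pvRoundA_len_le (package_files provides required : List (String × List String)) :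
    ∀ (tc : List (String × String)) (b : List String),
      (pvRoundA package_files provides required b tc).2.1.length ≤ tc.length := by
  intro tc
  induction tc with
  | nil => intro b; simp [pvRoundA]
  | cons it rest ih =>
    intro b
    simp only [pvRoundA]
    split
    · have := ih (PySem.Set.add b it.1); simpa using Nat.le_succ_of_le this
    · have := ih b; simpa using this

theorem pvRoundA_len_lt (package_files provides required : List (String × List String)) :
    ∀ (tc : List (String × String)) (b : List String),
      (pvRoundA package_files provides required b tc).2.2 = true →
      (pvRoundA package_files provides required b tc).2.1.length < tc.length := by
  intro tc
  induction tc with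
  | nil => intro b h; simp [pvRoundA] at h
  | cons it rest ih =>
    intro b h
    simp only [pvRoundA] at *
    split at h <;> split
    · have := pvRoundA_len_le package_files provides required rest (PySem.Set.add b it.1)
      simp only [List.length_cons]; omega
    · simp_all
    · simp_all
    · rename_i h1 h2
      have := ih b h
      simp only [List.length_cons]; omega

-- A's tail recursion 'if new_required: return resolve_orphan_dependencies(…, new_check)'
def pvResolveA (package_files provides required : List (String × List String)) (b : List String)
    (tc : List (String × String)) : List (String × String) :=
  if h : (pvRoundA package_files provides required b tc).2.2 = true then
    pvResolveA package_files provides required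
      (pvRoundA package_files provides required b tc).1
      (pvRoundA package_files provides required b tc).2.1
  else
    (pvRoundA package_files provides required b tc).2.1
termination_by tc.length
decreasing_by exact pvRoundA_len_lt package_files provides required tc b h

def resolve_orphan_dependencies (bundled : List String) (orphans : List String) (package_files : List (String × List String)) (provides : List (String × List String)) (required : List (String × List String)) (to_check : List (String × String)) : List (String × String) :=
  pvResolveA package_files provides required bundled to_check

-- ===== PORT B =====
-- rev.setdefault(req, []).append(srcrpm) over the three nested loops of Source B
def pvRevIndex (package_files provides required : List (String × List String))
    (tc : List (String × String)) : PySem.Dict String (List String) :=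
  tc.foldl (fun d it =>
    ((pvGet provides it.1) ++ (pvGet package_files it.1)).foldl (fun d key =>
      (pvGet required key).foldl (fun d req => d.modify req [] (fun l => l ++ [it.1])) d) d)
    PySem.Dict.empty

-- 'if s not in marked: marked.add(s); stack.append(s)' (stack top = list head)
def pvBfsPush (ms : List String × List String) (s : String) : List String × List String :=
  if ms.1.contains s then ms else (ms.1 ++ [s], s :: ms.2)

-- every name a worklist step can mark lives in the ranges of rev (for termination)
theorem pvBfs_mem_univ (rev : PySem.Dict String (List String)) (r : String) :
    ∀ s ∈ rev.getD r [], s ∈ rev.values.flatten := by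
  intro s hs
  simp only [PySem.Dict.getD, PySem.Dict.get?] at hs
  cases hf : List.find? (fun p => p.1 == r) rev.items with
  | none => rw [hf] at hs; simp at hs
  | some p =>
    rw [hf] at hs
    simp only [Option.map_some, Option.getD_some] at hs
    have hp := List.mem_of_find?_eq_some hf
    simp only [PySem.Dict.values, List.mem_flatten]
    exact ⟨p.2, List.mem_map_of_mem hp, hs⟩

theorem pvCountP_lt_of_imp (p q : String → Bool) :
    ∀ (U : List String), (∀ a, p a = true → q a = true) →
      ∀ x ∈ U, q x = true → p x = false →
      U.countP p < U.countP q := by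
  intro U
  induction U with
  | nil => intro _ x hx; simp at hx
  | cons a U ih =>
    intro himp x hx hq hp
    rcases List.mem_cons.mp hx with h | h
    · subst h
      rw [List.countP_cons, List.countP_cons]
      simp only [hp, hq, Bool.false_eq_true, if_false, if_true]
      have := List.countP_mono_left (l := U) (fun a _ => himp a)
      omega
    · have hlt := ih himp x h hq hp
      rw [List.countP_cons, List.countP_cons]
      cases e1 : p a
      · simp only [Bool.false_eq_true, if_false]
        split <;> omega
      · simp only [himp a e1, if_true]
        omega

theorem pvBfsPush_marked (ms : List String × List String) (s : String) :
    pvBfsPush ms s = if ms.1.contains s then ms else (ms.1 ++ [s], s :: ms.2) := rfl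

theorem pvBfsPush_measure (U : List String) :
    ∀ (xs marked rest : List String), (∀ s ∈ xs, s ∈ U) →
      2 * (U.countP (fun s => !((xs.foldl pvBfsPush (marked, rest)).1.contains s))) +
        (xs.foldl pvBfsPush (marked, rest)).2.length ≤
      2 * (U.countP (fun s => !(marked.contains s))) + rest.length := by
  intro xs
  induction xs with
  | nil => intro marked rest _; simp
  | cons x xs ih =>
    intro marked rest hmem
    simp only [List.foldl_cons, pvBfsPush_marked]
    by_cases hx : marked.contains x = true
    · simp only [hx, if_true]
      exact ih marked rest (fun s hs => hmem s (List.mem_cons_of_mem x hs))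
    · simp only [hx, Bool.false_eq_true, if_false]
      have h1 := ih (marked ++ [x]) (x :: rest) (fun s hs => hmem s (List.mem_cons_of_mem x hs))
      have h2 : U.countP (fun s => !((marked ++ [x]).contains s)) < U.countP (fun s => !(marked.contains s)) := by
        apply pvCountP_lt_of_imp _ _ U
        · intro a ha
          simp only [Bool.not_eq_true', List.contains_eq_mem, decide_eq_false_iff_not] at ha ⊢
          intro hmm; exact ha (List.mem_append_left _ hmm)
        · exact hmem x (List.mem_cons_self)
        · simpa using hx
        · simp
      simp only [List.length_cons] at h1
      omega

-- 'while stack: r = stack.pop(); for s in rev.get(r, ()): …'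
def pvBfs (rev : PySem.Dict String (List String)) : List String → List String → List String
  | marked, [] => marked
  | marked, r :: rest =>
    let st := (rev.getD r []).foldl pvBfsPush (marked, rest)
    pvBfs rev st.1 st.2
termination_by marked stack => 2 * ((rev.values.flatten).countP (fun s => !(marked.contains s))) + stack.length
decreasing_by
  have h := pvBfsPush_measure rev.values.flatten (rev.getD r []) marked rest (pvBfs_mem_univ rev r)
  simp only [List.length_cons]
  omega

def resolve_orphan_dependencies_alt (bundled : List String) (orphans : List String) (package_files : List (String × List String)) (provides : List (String × List String)) (required : List (String × List String)) (to_check : List (String × String)) : List (String × String) :=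
  let rev := pvRevIndex package_files provides required to_check
  let marked := pvBfs rev [] bundled
  to_check.filter (fun it => !(marked.contains it.1))

-- ===== PRECONDITION & SPEC =====
def Spec_resolve_orphan_dependencies (bundled : List String) (orphans : List String) (package_files : List (String × List String)) (provides : List (String × List String)) (required : List (String × List String)) (to_check : List (String × String)) (out : List (String × String)) : Prop := out = resolve_orphan_dependencies_alt bundled orphans package_files provides required to_check
instance (bundled : List String) (orphans : List String) (package_files : List (String × List String)) (provides : List (String × List String)) (required : List (String × List String)) (to_check : List (String × String)) (out : List (String × String)) : Decidable (Spec_resolve_orphan_dependencies bundled orphans package_files provides required to_check out) := by unfold Spec_resolve_orphan_dependencies; infer_instance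

-- ===== CLAIM (what is proved, stated in full; the proofs are below) =====
def Claim_equal_resolve_orphan_dependencies : Prop := ∀ (bundled : List String) (orphans : List String) (package_files : List (String × List String)) (provides : List (String × List String)) (required : List (String × List String)) (to_check : List (String × String)), Dom_resolve_orphan_dependencies bundled orphans package_files provides required to_check → Spec_resolve_orphan_dependencies bundled orphans package_files provides required to_check (resolve_orphan_dependencies bundled orphans package_files provides required to_check)

-- ===== LEMMAS AND PROOFS =====

-- the requirement names that can mark srcrpm s as used (A's two nested loops, flattened)
def pvReqs (package_files provides required : List (String × List String)) (s : String) : List String :=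
  (pvGet provides s ++ pvGet package_files s).flatMap (pvGet required)

-- the closure both programs compute: reachable from b0 through one dependency step per element of tck
inductive pvReach (package_files provides required : List (String × List String))
    (tck : List String) (b0 : List String) : String → Prop
  | base (x : String) : x ∈ b0 → pvReach package_files provides required tck b0 x
  | step (s r : String) : s ∈ tck → r ∈ pvReqs package_files provides required s →
      pvReach package_files provides required tck b0 r →
      pvReach package_files provides required tck b0 s

theorem pvFoldl_if_or {α : Type} (f : α → Bool) :
    ∀ (l : List α) (u : Bool), l.foldl (fun a x => if a then a else f x) u = (u || l.any f) := by
  intro l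
  induction l with
  | nil => intro u; simp
  | cons x l ih =>
    intro u
    cases u <;> simp [ih] <;> cases f x <;> simp [ih]

theorem pvUsedA_iff (package_files provides required : List (String × List String))
    (b : List String) (s : String) :
    pvUsedA package_files provides required b s = true ↔
      ∃ r ∈ pvReqs package_files provides required s, r ∈ b := by
  unfold pvUsedA pvUsedLoop pvReqs
  simp only [pvFoldl_if_or, Bool.false_or, Bool.or_eq_true, List.any_eq_true,
    List.mem_flatMap, List.mem_append, List.contains_eq_mem, decide_eq_true_eq]
  constructor
  · rintro (⟨k, hk, r, hr, hb⟩ | ⟨k, hk, r, hr, hb⟩)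
    · exact ⟨r, ⟨k, Or.inl hk, hr⟩, hb⟩
    · exact ⟨r, ⟨k, Or.inr hk, hr⟩, hb⟩
  · rintro ⟨r, ⟨k, hk | hk, hr⟩, hb⟩
    · exact Or.inl ⟨k, hk, r, hr, hb⟩
    · exact Or.inr ⟨k, hk, r, hr, hb⟩

theorem pvRoundA_b_mono (package_files provides required : List (String × List String)) :
    ∀ (tc : List (String × String)) (b : List String) (x : String), x ∈ b →
      x ∈ (pvRoundA package_files provides required b tc).1 := by
  intro tc
  induction tc with
  | nil => intro b x hx; simpa [pvRoundA] using hx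
  | cons it rest ih =>
    intro b x hx
    simp only [pvRoundA]
    split
    · exact ih _ x (by rw [PySem.Set.mem_add]; exact Or.inl hx)
    · exact ih _ x hx

theorem pvRoundA_sound (package_files provides required : List (String × List String))
    (tck b0 : List String) :
    ∀ (tc : List (String × String)) (b : List String),
      (∀ x ∈ b, pvReach package_files provides required tck b0 x) →
      (∀ it ∈ tc, it.1 ∈ tck) →
      ∀ x ∈ (pvRoundA package_files provides required b tc).1,
        pvReach package_files provides required tck b0 x := by
  intro tc
  induction tc with
  | nil => intro b hb _ x hx; exact hb x (by simpa [pvRoundA] using hx)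
  | cons it rest ih =>
    intro b hb hk x hx
    simp only [pvRoundA] at hx
    split at hx
    · rename_i hu
      refine ih _ ?_ (fun it' h => hk it' (List.mem_cons_of_mem _ h)) x hx
      intro y hy
      rw [PySem.Set.mem_add] at hy
      rcases hy with hy | hy
      · exact hb y hy
      · subst hy
        obtain ⟨r, hr, hrb⟩ := (pvUsedA_iff package_files provides required b it.1).mp hu
        exact pvReach.step it.1 r (hk it (List.mem_cons_self)) hr (hb r hrb)
    · exact ih _ hb (fun it' h => hk it' (List.mem_cons_of_mem _ h)) x hx

theorem pvRoundA_sublist (package_files provides required : List (String × List String)) :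
    ∀ (tc : List (String × String)) (b : List String),
      (pvRoundA package_files provides required b tc).2.1.Sublist tc := by
  intro tc
  induction tc with
  | nil => intro b; simp [pvRoundA]
  | cons it rest ih =>
    intro b
    simp only [pvRoundA]
    split
    · exact (ih _).cons it
    · exact (ih _).cons₂ it

theorem pvRoundA_cons (package_files provides required : List (String × List String)) :
    ∀ (tc : List (String × String)) (b : List String) (it : String × String), it ∈ tc →
      it ∈ (pvRoundA package_files provides required b tc).2.1 ∨
      it.1 ∈ (pvRoundA package_files provides required b tc).1 := by
  intro tc
  induction tc with
  | nil => intro b it h; simp at h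
  | cons it0 rest ih =>
    intro b it hmem
    simp only [pvRoundA]
    rcases List.mem_cons.mp hmem with h | h
    · subst h
      split
      · exact Or.inr (pvRoundA_b_mono package_files provides required rest _ it.1
          (by rw [PySem.Set.mem_add]; exact Or.inr rfl))
      · exact Or.inl (List.mem_cons_self)
    · split
      · exact ih _ it h
      · rcases ih b it h with h' | h'
        · exact Or.inl (List.mem_cons_of_mem _ h')
        · exact Or.inr h'

theorem pvRoundA_stable (package_files provides required : List (String × List String)) :
    ∀ (tc : List (String × String)) (b : List String),
      (pvRoundA package_files provides required b tc).2.2 = false →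
      (pvRoundA package_files provides required b tc).1 = b ∧
      (pvRoundA package_files provides required b tc).2.1 = tc ∧
      ∀ it ∈ tc, pvUsedA package_files provides required b it.1 = false := by
  intro tc
  induction tc with
  | nil => intro b _; refine ⟨rfl, rfl, by simp⟩
  | cons it rest ih =>
    intro b hf
    simp only [pvRoundA] at hf ⊢
    by_cases hu : pvUsedA package_files provides required b it.1 = true
    · rw [if_pos hu] at hf; simp at hf
    · rw [if_neg hu] at hf ⊢
      obtain ⟨h1, h2, h3⟩ := ih b hf
      refine ⟨h1, by rw [h2], ?_⟩
      intro it' h'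
      rcases List.mem_cons.mp h' with h' | h'
      · subst h'; simpa using hu
      · exact h3 it' h'

theorem pvRoundA_filter (package_files provides required : List (String × List String))
    (tck b0 : List String) (p : String × String → Bool) :
    ∀ (tc : List (String × String)) (b : List String),
      (∀ x ∈ b, pvReach package_files provides required tck b0 x) →
      (∀ it ∈ tc, it.1 ∈ tck) →
      (∀ it ∈ tc, (∃ r ∈ pvReqs package_files provides required it.1,
          pvReach package_files provides required tck b0 r) → p it = false) →
      tc.filter p = (pvRoundA package_files provides required b tc).2.1.filter p := by
  intro tc
  induction tc with
  | nil => intro b _ _ _; simp [pvRoundA]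
  | cons it rest ih =>
    intro b hb hk hp
    simp only [pvRoundA]
    split
    · rename_i hu
      obtain ⟨r, hr, hrb⟩ := (pvUsedA_iff package_files provides required b it.1).mp hu
      have hpit : p it = false := hp it (List.mem_cons_self) ⟨r, hr, hb r hrb⟩
      rw [List.filter_cons_of_neg (by simp [hpit])]
      refine ih _ ?_ (fun it' h => hk it' (List.mem_cons_of_mem _ h))
        (fun it' h => hp it' (List.mem_cons_of_mem _ h))
      intro y hy
      rw [PySem.Set.mem_add] at hy
      rcases hy with hy | hy
      · exact hb y hy
      · subst hy
        exact pvReach.step it.1 r (hk it (List.mem_cons_self)) hr (hb r hrb)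
    · have := ih b hb (fun it' h => hk it' (List.mem_cons_of_mem _ h))
        (fun it' h => hp it' (List.mem_cons_of_mem _ h))
      simp only [List.filter_cons, this]

theorem pvResolveA_eq_filter (package_files provides required : List (String × List String))
    (tc0 : List (String × String)) (b0 : List String) (p : String × String → Bool)
    (hP : ∀ it ∈ tc0, (p it = true ↔
      ¬ ∃ r ∈ pvReqs package_files provides required it.1,
          pvReach package_files provides required (tc0.map Prod.fst) b0 r)) :
    ∀ (n : Nat) (tc : List (String × String)) (b : List String), tc.length ≤ n →
      (∀ x ∈ b0, x ∈ b) →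
      (∀ x ∈ b, pvReach package_files provides required (tc0.map Prod.fst) b0 x) →
      (∀ it ∈ tc, it ∈ tc0) →
      (∀ it ∈ tc0, it ∈ tc ∨ it.1 ∈ b) →
      pvResolveA package_files provides required b tc = tc.filter p := by
  intro n
  induction n with
  | zero =>
    intro tc b hlen _ _ _ _
    have : tc = [] := List.eq_nil_of_length_eq_zero (Nat.le_zero.mp hlen)
    subst this
    rw [pvResolveA]
    simp [pvRoundA]
  | succ n ih =>
    intro tc b hlen hb0 hb htc0 hcons
    have hk : ∀ it ∈ tc, it.1 ∈ tc0.map Prod.fst :=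
      fun it h => List.mem_map_of_mem (htc0 it h)
    rw [pvResolveA]
    by_cases hf : (pvRoundA package_files provides required b tc).2.2 = true
    · rw [dif_pos hf]
      have hflt := pvRoundA_filter package_files provides required (tc0.map Prod.fst) b0 p tc b hb hk
        (fun it h hex => by
          have hiff := hP it (htc0 it h)
          cases e : p it
          · rfl
          · exact absurd hex (hiff.mp e))
      have hlen' : (pvRoundA package_files provides required b tc).2.1.length ≤ n := by
        have := pvRoundA_len_lt package_files provides required tc b hf
        omega
      have hrec := ih (pvRoundA package_files provides required b tc).2.1
        (pvRoundA package_files provides required b tc).1 hlen'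
        (fun x hx => pvRoundA_b_mono package_files provides required tc b x (hb0 x hx))
        (pvRoundA_sound package_files provides required (tc0.map Prod.fst) b0 tc b hb hk)
        (fun it h => htc0 it ((pvRoundA_sublist package_files provides required tc b).subset h))
        (fun it hit => by
          rcases hcons it hit with hin | hin
          · exact pvRoundA_cons package_files provides required tc b it hin
          · exact Or.inr (pvRoundA_b_mono package_files provides required tc b it.1 hin))
      rw [hrec, ← hflt]
    · rw [dif_neg hf]
      obtain ⟨h1, h2, h3⟩ := pvRoundA_stable package_files provides required tc b
        (by simpa using hf)
      rw [h2]
      have hcomp : ∀ x, pvReach package_files provides required (tc0.map Prod.fst) b0 x → x ∈ b := by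
        intro x hx
        induction hx with
        | base y hy => exact hb0 y hy
        | step s r hs hr _ ihr =>
          obtain ⟨it, hit, hfst⟩ := List.mem_map.mp hs
          rcases hcons it hit with hin | hin
          · exfalso
            have : pvUsedA package_files provides required b it.1 = true :=
              (pvUsedA_iff package_files provides required b it.1).mpr ⟨r, hfst ▸ hr, ihr⟩
            rw [h3 it hin] at this
            exact Bool.false_ne_true this
          · exact hfst ▸ hin
      symm
      rw [List.filter_eq_self]
      intro it h
      refine (hP it (htc0 it h)).mpr ?_
      rintro ⟨r, hr, hRr⟩
      have : pvUsedA package_files provides required b it.1 = true :=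
        (pvUsedA_iff package_files provides required b it.1).mpr ⟨r, hr, hcomp r hRr⟩
      rw [h3 it h] at this
      exact Bool.false_ne_true this

theorem pvRev_inner_mem (reqs : List String) (d : PySem.Dict String (List String)) (v r s : String) :
    s ∈ (reqs.foldl (fun d req => d.modify req [] (fun l => l ++ [v])) d).getD r [] ↔
      s ∈ d.getD r [] ∨ (r ∈ reqs ∧ s = v) := by
  have h : reqs.foldl (fun d req => d.modify req [] (fun l => l ++ [v])) d
      = (reqs.map (fun req => (req, v))).foldl (fun d p => d.modify p.1 [] (fun l => l ++ [p.2])) d := by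
    rw [List.foldl_map]
  rw [h, PySem.Dict.getD_foldl_modify_append]
  constructor
  · intro hmem
    rcases List.mem_append.mp hmem with hd | hs
    · exact Or.inl hd
    · obtain ⟨p, hp, hsnd⟩ := List.mem_map.mp hs
      obtain ⟨hpmem, hbeq⟩ := List.mem_filter.mp hp
      obtain ⟨req, hreq, hpe⟩ := List.mem_map.mp hpmem
      subst hpe
      simp only [beq_iff_eq] at hbeq
      exact Or.inr ⟨hbeq ▸ hreq, hsnd.symm⟩
  · rintro (hd | ⟨hr, hsv⟩)
    · exact List.mem_append_left _ hd
    · exact List.mem_append_right _ (List.mem_map.mpr ⟨(r, v),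
        List.mem_filter.mpr ⟨List.mem_map.mpr ⟨r, hr, rfl⟩, by simp⟩, hsv.symm⟩)

theorem pvRev_keys_mem (required : List (String × List String)) :
    ∀ (keys : List String) (d : PySem.Dict String (List String)) (v r s : String),
      s ∈ (keys.foldl (fun d key =>
            (pvGet required key).foldl (fun d req => d.modify req [] (fun l => l ++ [v])) d) d).getD r [] ↔
        s ∈ d.getD r [] ∨ ((∃ key ∈ keys, r ∈ pvGet required key) ∧ s = v) := by
  intro keys
  induction keys with
  | nil => intro d v r s; simp
  | cons k keys ih =>
    intro d v r s
    simp only [List.foldl_cons]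
    rw [ih, pvRev_inner_mem]
    constructor
    · rintro ((hd | ⟨hr, hsv⟩) | ⟨⟨key, hk, hr⟩, hsv⟩)
      · exact Or.inl hd
      · exact Or.inr ⟨⟨k, List.mem_cons_self, hr⟩, hsv⟩
      · exact Or.inr ⟨⟨key, List.mem_cons_of_mem _ hk, hr⟩, hsv⟩
    · rintro (hd | ⟨⟨key, hk, hr⟩, hsv⟩)
      · exact Or.inl (Or.inl hd)
      · rcases List.mem_cons.mp hk with h | h
        · exact Or.inl (Or.inr ⟨h ▸ hr, hsv⟩)
        · exact Or.inr ⟨⟨key, h, hr⟩, hsv⟩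

theorem pvRevIndex_mem_aux (package_files provides required : List (String × List String)) :
    ∀ (tc : List (String × String)) (d : PySem.Dict String (List String)) (r s : String),
      s ∈ (tc.foldl (fun d it =>
            ((pvGet provides it.1) ++ (pvGet package_files it.1)).foldl (fun d key =>
              (pvGet required key).foldl (fun d req => d.modify req [] (fun l => l ++ [it.1])) d) d) d).getD r [] ↔
        s ∈ d.getD r [] ∨ ∃ it ∈ tc, s = it.1 ∧ r ∈ pvReqs package_files provides required it.1 := by
  intro tc
  induction tc with
  | nil => intro d r s; simp
  | cons it tc ih =>
    intro d r s
    simp only [List.foldl_cons]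
    rw [ih, pvRev_keys_mem]
    have hreqs : (∃ key ∈ pvGet provides it.1 ++ pvGet package_files it.1, r ∈ pvGet required key) ↔
        r ∈ pvReqs package_files provides required it.1 := by
      simp only [pvReqs, List.mem_flatMap, List.mem_append]
    constructor
    · rintro ((hd | ⟨hex, hsv⟩) | ⟨it', hit', hsv, hr⟩)
      · exact Or.inl hd
      · exact Or.inr ⟨it, List.mem_cons_self, hsv, hreqs.mp hex⟩
      · exact Or.inr ⟨it', List.mem_cons_of_mem _ hit', hsv, hr⟩
    · rintro (hd | ⟨it', hit', hsv, hr⟩)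
      · exact Or.inl (Or.inl hd)
      · rcases List.mem_cons.mp hit' with h | h
        · subst h; exact Or.inl (Or.inr ⟨hreqs.mpr hr, hsv⟩)
        · exact Or.inr ⟨it', h, hsv, hr⟩

theorem pvRevIndex_mem (package_files provides required : List (String × List String))
    (tc : List (String × String)) (r s : String) :
    s ∈ (pvRevIndex package_files provides required tc).getD r [] ↔
      ∃ it ∈ tc, s = it.1 ∧ r ∈ pvReqs package_files provides required it.1 := by
  rw [pvRevIndex, pvRevIndex_mem_aux]
  simp [PySem.Dict.getD, PySem.Dict.get?, PySem.Dict.empty]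

theorem pvPush_m_mono : ∀ (xs : List String) (m sk : List String) (x : String), x ∈ m →
    x ∈ (xs.foldl pvBfsPush (m, sk)).1 := by
  intro xs
  induction xs with
  | nil => intro m sk x hx; exact hx
  | cons x0 xs ih =>
    intro m sk x hx
    simp only [List.foldl_cons, pvBfsPush_marked]
    by_cases h : m.contains x0 = true
    · rw [if_pos h]; exact ih m sk x hx
    · rw [if_neg h]; exact ih _ _ x (List.mem_append_left _ hx)

theorem pvPush_m_sub : ∀ (xs : List String) (m sk : List String) (x : String),
    x ∈ (xs.foldl pvBfsPush (m, sk)).1 → x ∈ m ∨ x ∈ xs := by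
  intro xs
  induction xs with
  | nil => intro m sk x hx; exact Or.inl hx
  | cons x0 xs ih =>
    intro m sk x hx
    simp only [List.foldl_cons, pvBfsPush_marked] at hx
    by_cases h : m.contains x0 = true
    · rw [if_pos h] at hx
      rcases ih m sk x hx with h' | h'
      · exact Or.inl h'
      · exact Or.inr (List.mem_cons_of_mem _ h')
    · rw [if_neg h] at hx
      rcases ih _ _ x hx with h' | h'
      · rcases List.mem_append.mp h' with h'' | h''
        · exact Or.inl h''
        · simp only [List.mem_singleton] at h''
          exact Or.inr (h'' ▸ List.mem_cons_self)
      · exact Or.inr (List.mem_cons_of_mem _ h')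

theorem pvPush_xs_marked : ∀ (xs : List String) (m sk : List String) (x : String), x ∈ xs →
    x ∈ (xs.foldl pvBfsPush (m, sk)).1 := by
  intro xs
  induction xs with
  | nil => intro m sk x hx; simp at hx
  | cons x0 xs ih =>
    intro m sk x hx
    simp only [List.foldl_cons, pvBfsPush_marked]
    rcases List.mem_cons.mp hx with h | h
    · subst h
      by_cases hc : m.contains x = true
      · rw [if_pos hc]
        exact pvPush_m_mono xs m sk x (by simpa [List.contains_eq_mem] using hc)
      · rw [if_neg hc]
        exact pvPush_m_mono xs _ _ x (List.mem_append_right _ (List.mem_singleton.mpr rfl))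
    · split <;> exact ih _ _ x h

theorem pvPush_sk_mono : ∀ (xs : List String) (m sk : List String) (x : String), x ∈ sk →
    x ∈ (xs.foldl pvBfsPush (m, sk)).2 := by
  intro xs
  induction xs with
  | nil => intro m sk x hx; exact hx
  | cons x0 xs ih =>
    intro m sk x hx
    simp only [List.foldl_cons, pvBfsPush_marked]
    by_cases h : m.contains x0 = true
    · rw [if_pos h]; exact ih m sk x hx
    · rw [if_neg h]; exact ih _ _ x (List.mem_cons_of_mem _ hx)

theorem pvPush_sk_sub : ∀ (xs : List String) (m sk : List String) (x : String),
    x ∈ (xs.foldl pvBfsPush (m, sk)).2 → x ∈ sk ∨ x ∈ (xs.foldl pvBfsPush (m, sk)).1 := by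
  intro xs
  induction xs with
  | nil => intro m sk x hx; exact Or.inl hx
  | cons x0 xs ih =>
    intro m sk x hx
    simp only [List.foldl_cons, pvBfsPush_marked] at hx ⊢
    by_cases h : m.contains x0 = true
    · rw [if_pos h] at hx ⊢; exact ih m sk x hx
    · rw [if_neg h] at hx ⊢
      rcases ih _ _ x hx with h' | h'
      · rcases List.mem_cons.mp h' with h'' | h''
        · subst h''
          exact Or.inr (pvPush_m_mono xs _ _ x
            (List.mem_append_right _ (List.mem_singleton.mpr rfl)))
        · exact Or.inl h''
      · exact Or.inr h'

theorem pvPush_xs_stack : ∀ (xs : List String) (m sk : List String) (x : String), x ∈ xs →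
    x ∈ m ∨ x ∈ (xs.foldl pvBfsPush (m, sk)).2 := by
  intro xs
  induction xs with
  | nil => intro m sk x hx; simp at hx
  | cons x0 xs ih =>
    intro m sk x hx
    simp only [List.foldl_cons, pvBfsPush_marked]
    by_cases h : m.contains x0 = true
    · rw [if_pos h]
      rcases List.mem_cons.mp hx with h' | h'
      · subst h'
        exact Or.inl (by simpa [List.contains_eq_mem] using h)
      · exact ih m sk x h'
    · rw [if_neg h]
      rcases List.mem_cons.mp hx with h' | h'
      · subst h'
        exact Or.inr (pvPush_sk_mono xs _ _ x List.mem_cons_self)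
      · rcases ih (m ++ [x0]) (x0 :: sk) x h' with h'' | h''
        · rcases List.mem_append.mp h'' with h3 | h3
          · exact Or.inl h3
          · have h4 : x = x0 := by simpa using h3
            exact Or.inr (h4 ▸ pvPush_sk_mono xs _ _ x List.mem_cons_self)
        · exact Or.inr h''

theorem pvBfs_spec (package_files provides required : List (String × List String))
    (tc0 : List (String × String)) (b0 : List String) :
    ∀ (marked stack : List String),
      (∀ s ∈ marked, s ∈ tc0.map Prod.fst ∧ ∃ r ∈ pvReqs package_files provides required s,
          pvReach package_files provides required (tc0.map Prod.fst) b0 r) →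
      (∀ r ∈ stack, pvReach package_files provides required (tc0.map Prod.fst) b0 r) →
      (∀ r, (r ∈ b0 ∨ r ∈ marked) → r ∈ stack ∨
          ∀ s ∈ (pvRevIndex package_files provides required tc0).getD r [], s ∈ marked) →
      (∀ s ∈ marked, s ∈ pvBfs (pvRevIndex package_files provides required tc0) marked stack) ∧
      (∀ s ∈ pvBfs (pvRevIndex package_files provides required tc0) marked stack,
          s ∈ tc0.map Prod.fst ∧ ∃ r ∈ pvReqs package_files provides required s,
            pvReach package_files provides required (tc0.map Prod.fst) b0 r) ∧
      (∀ r, (r ∈ b0 ∨ r ∈ pvBfs (pvRevIndex package_files provides required tc0) marked stack) →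
          ∀ s ∈ (pvRevIndex package_files provides required tc0).getD r [],
            s ∈ pvBfs (pvRevIndex package_files provides required tc0) marked stack) := by
  intro marked stack
  induction marked, stack using pvBfs.induct (rev := pvRevIndex package_files provides required tc0) with
  | case1 marked =>
    intro h1 _ h3
    rw [pvBfs]
    refine ⟨fun s hs => hs, h1, ?_⟩
    intro r hr
    rcases h3 r hr with h | h
    · simp at h
    · exact h
  | case2 marked r rest st ih =>
    intro h1 h2 h3
    rw [pvBfs]
    set rev := pvRevIndex package_files provides required tc0 with hrev
    set xs := rev.getD r [] with hxs
    have h1' : ∀ s ∈ (xs.foldl pvBfsPush (marked, rest)).1,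
        s ∈ tc0.map Prod.fst ∧ ∃ r' ∈ pvReqs package_files provides required s,
          pvReach package_files provides required (tc0.map Prod.fst) b0 r' := by
      intro s hs
      rcases pvPush_m_sub xs marked rest s hs with h | h
      · exact h1 s h
      · obtain ⟨it, hit, hsv, hr⟩ := (pvRevIndex_mem package_files provides required tc0 r s).mp h
        subst hsv
        exact ⟨List.mem_map_of_mem hit, r, hr, h2 r List.mem_cons_self⟩
    have h2' : ∀ r' ∈ (xs.foldl pvBfsPush (marked, rest)).2,
        pvReach package_files provides required (tc0.map Prod.fst) b0 r' := by
      intro r' hr'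
      rcases pvPush_sk_sub xs marked rest r' hr' with h | h
      · exact h2 r' (List.mem_cons_of_mem _ h)
      · obtain ⟨hmem, rr, hrr, hR⟩ := h1' r' h
        exact pvReach.step r' rr hmem hrr hR
    have hdisp : ∀ r', (r' ∈ r :: rest ∨ ∀ s ∈ rev.getD r' [], s ∈ marked) →
        r' ∈ (xs.foldl pvBfsPush (marked, rest)).2 ∨
        ∀ s ∈ rev.getD r' [], s ∈ (xs.foldl pvBfsPush (marked, rest)).1 := by
      intro r' hcase
      rcases hcase with hmem | hexp
      · rcases List.mem_cons.mp hmem with he | he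
        · subst he
          exact Or.inr (fun s hs => pvPush_xs_marked xs marked rest s hs)
        · exact Or.inl (pvPush_sk_mono xs marked rest r' he)
      · exact Or.inr (fun s hs => pvPush_m_mono xs marked rest s (hexp s hs))
    have h3' : ∀ r', (r' ∈ b0 ∨ r' ∈ (xs.foldl pvBfsPush (marked, rest)).1) →
        r' ∈ (xs.foldl pvBfsPush (marked, rest)).2 ∨
        ∀ s ∈ rev.getD r' [], s ∈ (xs.foldl pvBfsPush (marked, rest)).1 := by
      intro r' hr'
      rcases hr' with hb | hst
      · exact hdisp r' (h3 r' (Or.inl hb))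
      · rcases pvPush_m_sub xs marked rest r' hst with hm | hx
        · exact hdisp r' (h3 r' (Or.inr hm))
        · rcases pvPush_xs_stack xs marked rest r' hx with hm | hstk
          · exact hdisp r' (h3 r' (Or.inr hm))
          · exact Or.inl hstk
    obtain ⟨C1, C2, C3⟩ := ih h1' h2' h3'
    exact ⟨fun s hs => C1 s (pvPush_m_mono xs marked rest s hs), C2, C3⟩

theorem pvBfs_mem_iff (package_files provides required : List (String × List String))
    (tc0 : List (String × String)) (b0 : List String) (s : String) :
    s ∈ pvBfs (pvRevIndex package_files provides required tc0) [] b0 ↔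
      s ∈ tc0.map Prod.fst ∧ ∃ r ∈ pvReqs package_files provides required s,
        pvReach package_files provides required (tc0.map Prod.fst) b0 r := by
  obtain ⟨-, C2, C3⟩ := pvBfs_spec package_files provides required tc0 b0 [] b0
    (by simp) (fun r hr => pvReach.base r hr)
    (fun r hr => Or.inl (by rcases hr with h | h; exact h; simp at h))
  constructor
  · exact C2 s
  · rintro ⟨hmem, r, hr, hR⟩
    have hcl : ∀ x, pvReach package_files provides required (tc0.map Prod.fst) b0 x →
        x ∈ b0 ∨ x ∈ pvBfs (pvRevIndex package_files provides required tc0) [] b0 := by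
      intro x hx
      induction hx with
      | base y hy => exact Or.inl hy
      | step s' r' hs' hr' _ ihr =>
        refine Or.inr (C3 r' ihr s' ?_)
        obtain ⟨it, hit, hfst⟩ := List.mem_map.mp hs'
        exact (pvRevIndex_mem package_files provides required tc0 r' s').mpr
          ⟨it, hit, hfst.symm, hfst ▸ hr'⟩
    refine C3 r (hcl r hR) s ?_
    obtain ⟨it, hit, hfst⟩ := List.mem_map.mp hmem
    exact (pvRevIndex_mem package_files provides required tc0 r s).mpr
      ⟨it, hit, hfst.symm, hfst ▸ hr⟩

-- ===== VERDICT (by name: the statement is the Claim_ definition above) =====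
theorem resolve_orphan_dependencies_spec : Claim_equal_resolve_orphan_dependencies := by
  intro bundled orphans package_files provides required to_check _hdom
  show resolve_orphan_dependencies bundled orphans package_files provides required to_check =
    resolve_orphan_dependencies_alt bundled orphans package_files provides required to_check
  simp only [resolve_orphan_dependencies, resolve_orphan_dependencies_alt]
  refine pvResolveA_eq_filter package_files provides required to_check bundled
    (fun it => !((pvBfs (pvRevIndex package_files provides required to_check) [] bundled).contains it.1))
    ?_ to_check.length to_check bundled (Nat.le_refl _)
    (fun x hx => hx) (fun x hx => pvReach.base x hx) (fun it h => h) (fun it h => Or.inl h)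
  intro it hit
  have hM := pvBfs_mem_iff package_files provides required to_check bundled it.1
  have hmem : it.1 ∈ to_check.map Prod.fst := List.mem_map_of_mem hit
  constructor
  · intro h hex
    have : it.1 ∈ pvBfs (pvRevIndex package_files provides required to_check) [] bundled :=
      hM.mpr ⟨hmem, hex⟩
    simp [List.contains_eq_mem, this] at h
  · intro h
    simp only [Bool.not_eq_true', List.contains_eq_mem, decide_eq_false_iff_not]
    intro hin
    exact h (hM.mp hin).2
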